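-- pv_equiv track=rewrite | github.com/dogamer2/surge-backnd | api/v1/ppt/endpoints/slide_to_html.py | _is_retryable_google_error
-- ===== SOURCE A (Python) =====
-- def _is_retryable_google_error(error_message: str) -> bool:
--     msg = (error_message or "").lower()
--     return any(
--         token in msg
--         for token in [
--             "502",
--             "503",
--             "504",
--             "bad gateway",
--             "service unavailable",
--             "deadline exceeded",
--             "timeout",
--             "temporarily unavailable",
--             "429",
--             "rate limit",
--         ]
--     )
-- ===== SOURCE B (Python) =====
-- _RETRYABLE_TOKENS = [
--     "502",
--     "503",
--     "504",
--     "bad gateway",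
--     "service unavailable",
--     "deadline exceeded",
--     "timeout",
--     "temporarily unavailable",
--     "429",
--     "rate limit",
-- ]
--
--
-- def _is_retryable_google_error(error_message: str) -> bool:
--     # One left-to-right scan: at each position test whether any token starts there,
--     # instead of ten independent substring searches.
--     msg = (error_message or "").lower()
--     for i in range(len(msg)):
--         for token in _RETRYABLE_TOKENS:
--             if msg.startswith(token, i):
--                 return True
--     return False
-- ===== Notes on version B (the rewrite author's own statement) =====
-- stated objective: alternative
-- what changed: Replaced ten independent per-token substring-membership searches by a single left-to-right scan that checks at each position whether any token starts there via startswith.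
import Mathlib
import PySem

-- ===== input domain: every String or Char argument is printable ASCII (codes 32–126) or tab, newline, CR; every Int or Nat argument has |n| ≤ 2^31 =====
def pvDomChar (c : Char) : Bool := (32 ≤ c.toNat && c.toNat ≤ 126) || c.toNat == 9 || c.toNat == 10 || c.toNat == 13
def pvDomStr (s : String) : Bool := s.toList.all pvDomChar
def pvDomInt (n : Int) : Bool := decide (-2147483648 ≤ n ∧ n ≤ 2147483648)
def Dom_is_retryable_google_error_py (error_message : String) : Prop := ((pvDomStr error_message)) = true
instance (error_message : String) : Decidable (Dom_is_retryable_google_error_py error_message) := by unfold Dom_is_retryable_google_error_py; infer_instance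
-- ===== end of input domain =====

-- B replaces A's ten independent substring searches by one left-to-right scan that tests
-- each position for a token start (objective: alternative).

-- ===== PORT A =====
-- the token list A iterates over
def pvTokensA : List String :=
  ["502", "503", "504", "bad gateway", "service unavailable", "deadline exceeded",
   "timeout", "temporarily unavailable", "429", "rate limit"]

def is_retryable_google_error_py (error_message : String) : Bool :=
  -- (error_message or "") is error_message itself for strings (falsy string is "")
  let msg := PySem.Str.lower error_message
  pvTokensA.any (fun token => PySem.Str.isIn token msg)

-- ===== PORT B =====
-- the same token list, as char lists (Source B's _RETRYABLE_TOKENS)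
def pvTokensB : List (List Char) :=
  ["502".toList, "503".toList, "504".toList, "bad gateway".toList,
   "service unavailable".toList, "deadline exceeded".toList, "timeout".toList,
   "temporarily unavailable".toList, "429".toList, "rate limit".toList]

-- Source B's scan: for each position i (each suffix), test msg.startswith(token, i)
def pvScan : List Char → Bool
  | [] => false
  | c :: rest => pvTokensB.any (fun t => t.isPrefixOf (c :: rest)) || pvScan rest

def is_retryable_google_error_py_alt (error_message : String) : Bool :=
  pvScan (PySem.Chars.lower error_message.toList)

-- ===== PRECONDITION & SPEC =====
def Spec_is_retryable_google_error_py (error_message : String) (out : Bool) : Prop := out = is_retryable_google_error_py_alt error_message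
instance (error_message : String) (out : Bool) : Decidable (Spec_is_retryable_google_error_py error_message out) := by unfold Spec_is_retryable_google_error_py; infer_instance

-- ===== CLAIM (what is proved, stated in full; the proofs are below) =====
def Claim_equal_is_retryable_google_error_py : Prop := ∀ (error_message : String), Dom_is_retryable_google_error_py error_message → Spec_is_retryable_google_error_py error_message (is_retryable_google_error_py error_message)

-- ===== LEMMAS AND PROOFS =====

-- the scan finds exactly the infix occurrences of some token (all tokens are nonempty)
theorem pvScan_iff (l : List Char) :
    pvScan l = true ↔ ∃ t ∈ pvTokensB, t <:+: l := by
  induction l with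
  | nil =>
    simp only [pvScan]
    rw [Bool.false_eq_true, false_iff]
    rintro ⟨t, ht, hinf⟩
    have : t = [] := List.eq_nil_of_infix_nil hinf
    subst this
    revert ht; decide
  | cons c rest ih =>
    simp only [pvScan, Bool.or_eq_true, List.any_eq_true, List.isPrefixOf_iff_prefix, ih]
    constructor
    · rintro (⟨t, ht, hp⟩ | ⟨t, ht, hinf⟩)
      · exact ⟨t, ht, hp.isInfix⟩
      · exact ⟨t, ht, hinf.trans (List.suffix_cons c rest).isInfix⟩
    · rintro ⟨t, ht, hinf⟩
      rcases List.infix_cons_iff.mp hinf with hp | hinf'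
      · exact Or.inl ⟨t, ht, hp⟩
      · exact Or.inr ⟨t, ht, hinf'⟩

-- the two token lists are the same strings
theorem pvTokens_map : pvTokensA.map String.toList = pvTokensB := by decide

-- ===== VERDICT (by name: the statement is the Claim_ definition above) =====
theorem is_retryable_google_error_py_spec : Claim_equal_is_retryable_google_error_py := by
  intro s _
  unfold Spec_is_retryable_google_error_py is_retryable_google_error_py is_retryable_google_error_py_alt
  rw [Bool.eq_iff_iff, List.any_eq_true, pvScan_iff, ← pvTokens_map]
  simp only [List.mem_map]
  constructor
  · rintro ⟨t, ht, hin⟩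
    exact ⟨t.toList, ⟨t, ht, rfl⟩, by
      have := (PySem.Str.isIn_iff_infix t _).mp hin
      rwa [PySem.Str.toList_lower] at this⟩
  · rintro ⟨_, ⟨t, ht, rfl⟩, hinf⟩
    exact ⟨t, ht, (PySem.Str.isIn_iff_infix t _).mpr (by rwa [PySem.Str.toList_lower])⟩
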